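-- pv_equiv track=rewrite | github.com/saint-germain/prodimopy_test | prodimopy/prodimopy/plot.py | spnToLatex
-- ===== SOURCE A (Python) =====
-- def spnToLatex(spname):
--   name = spname
--   if spname == "HN2+": name = "N2H+"
--   if spname == "C18O": return "C^{18}O"
--   if spname == "13CO": return "^13CO"
--
--   newname = ""
--   for c in name:
--     if c.isdigit():
--       newname += "_" + c
--     elif c == "-":
--       newname += "^-"
--     elif c == "+":
--       newname += "^+"
--     elif c == "#":
--       newname += "\#"
--     else:
--       newname += c
--
--   return newname
-- ===== SOURCE B (Python) =====
-- _PASSES = [("-", "^-"), ("+", "^+"), ("#", "\\#")] + [(d, "_" + d) for d in "0123456789"]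
--
-- def spnToLatex(spname):
--     if spname == "HN2+":
--         spname = "N2H+"
--     if spname == "C18O":
--         return "C^{18}O"
--     if spname == "13CO":
--         return "^13CO"
--     for old, new in _PASSES:
--         spname = spname.replace(old, new)
--     return spname
-- ===== Notes on version B (the rewrite author's own statement) =====
-- stated objective: alternative
-- what changed: Replaces A's single per-character pass with an if/elif chain appending into an accumulator by thirteen staged whole-string str.replace passes, one per special character, driven by a pass table.
import Mathlib
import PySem

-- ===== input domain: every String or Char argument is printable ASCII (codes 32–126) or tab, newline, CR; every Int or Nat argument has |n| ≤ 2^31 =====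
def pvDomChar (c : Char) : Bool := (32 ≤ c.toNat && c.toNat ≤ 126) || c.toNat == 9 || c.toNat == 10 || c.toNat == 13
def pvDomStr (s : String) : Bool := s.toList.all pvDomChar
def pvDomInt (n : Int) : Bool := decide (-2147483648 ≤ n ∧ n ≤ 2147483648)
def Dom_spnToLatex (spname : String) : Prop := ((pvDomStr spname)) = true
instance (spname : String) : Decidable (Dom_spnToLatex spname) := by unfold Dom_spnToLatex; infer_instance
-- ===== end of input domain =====

-- B replaces A's single per-character if/elif accumulator loop with thirteen staged
-- whole-string replace passes, one per special character (return value only).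

-- ===== PORT A =====
-- A's for-loop: string accumulator, branch per character (work over List Char; String.ofList at the end)
def spnToLatexStep (newname : List Char) (c : Char) : List Char :=
  if c.isDigit then newname ++ ['_', c]
  else if c = '-' then newname ++ ['^', '-']
  else if c = '+' then newname ++ ['^', '+']
  else if c = '#' then newname ++ ['\\', '#']
  else newname ++ [c]

def spnToLatex (spname : String) : String :=
  let name := if spname = "HN2+" then "N2H+" else spname
  if spname = "C18O" then "C^{18}O"
  else if spname = "13CO" then "^13CO"
  else String.ofList (name.toList.foldl spnToLatexStep [])

-- ===== PORT B =====
-- the pass table _PASSES of Source B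
def pvPasses : List (String × String) :=
  [("-", "^-"), ("+", "^+"), ("#", "\\#"),
   ("0", "_0"), ("1", "_1"), ("2", "_2"), ("3", "_3"), ("4", "_4"),
   ("5", "_5"), ("6", "_6"), ("7", "_7"), ("8", "_8"), ("9", "_9")]

-- Source B's loop: one whole-string str.replace pass per table entry
def spnToLatex_alt (spname : String) : String :=
  let spname := if spname = "HN2+" then "N2H+" else spname
  if spname = "C18O" then "C^{18}O"
  else if spname = "13CO" then "^13CO"
  else pvPasses.foldl (fun s p => PySem.Str.replace s p.1 p.2) spname

-- ===== PRECONDITION & SPEC =====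
def Spec_spnToLatex (spname : String) (out : String) : Prop := out = spnToLatex_alt spname
instance (spname : String) (out : String) : Decidable (Spec_spnToLatex spname out) := by unfold Spec_spnToLatex; infer_instance

-- ===== CLAIM (what is proved, stated in full; the proofs are below) =====
def Claim_equal_spnToLatex : Prop := ∀ (spname : String), Dom_spnToLatex spname → Spec_spnToLatex spname (spnToLatex spname)

-- ===== LEMMAS AND PROOFS =====

-- replace a single character o by the list 'new' everywhere (what one pass does)
def pvSubst (o : Char) (new : List Char) (l : List Char) : List Char :=
  l.flatMap (fun c => if c = o then new else [c])

-- the pass table at the char-list level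
def pvPassesC : List (Char × List Char) :=
  [('-', ['^','-']), ('+', ['^','+']), ('#', ['\\','#']),
   ('0', ['_','0']), ('1', ['_','1']), ('2', ['_','2']), ('3', ['_','3']), ('4', ['_','4']),
   ('5', ['_','5']), ('6', ['_','6']), ('7', ['_','7']), ('8', ['_','8']), ('9', ['_','9'])]

def pvApplyAll (ps : List (Char × List Char)) (l : List Char) : List Char :=
  ps.foldl (fun l p => pvSubst p.1 p.2 l) l

-- per-character result of A's loop body (proof-side characterisation)
def pvTranslate1 (c : Char) : List Char :=
  if c.isDigit then ['_', c]
  else if c = '-' then ['^', '-']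
  else if c = '+' then ['^', '+']
  else if c = '#' then ['\\', '#']
  else [c]

lemma go_single (o : Char) (new : List Char) :
    ∀ (l acc : List Char) (fuel : Nat), l.length ≤ fuel →
      PySem.Chars.replace.go [o] new fuel l acc = acc.reverse ++ pvSubst o new l := by
  intro l
  induction l with
  | nil =>
    intro acc fuel _
    cases fuel <;> simp [PySem.Chars.replace.go, pvSubst]
  | cons c t ih =>
    intro acc fuel hf
    cases fuel with
    | zero => simp at hf
    | succ f =>
      have hf' : t.length ≤ f := by simpa using hf
      by_cases h : o = c
      · subst h
        simp only [PySem.Chars.replace.go, List.isPrefixOf, beq_self_eq_true, Bool.true_and,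
          if_true]
        rw [show List.drop (List.length [o]) (o :: t) = t by simp]
        rw [ih (new.reverse ++ acc) f hf']
        simp [pvSubst]
      · have hpre : ([o].isPrefixOf (c :: t)) = false := by
          simp [List.isPrefixOf, h]
        simp only [PySem.Chars.replace.go, hpre, if_false, Bool.false_eq_true]
        rw [ih (c :: acc) f hf']
        simp [pvSubst, Ne.symm h]

lemma replace_single (l : List Char) (o : Char) (new : List Char) :
    PySem.Chars.replace l [o] new = pvSubst o new l := by
  unfold PySem.Chars.replace
  simp only [List.isEmpty_cons, if_false, Bool.false_eq_true]
  exact go_single o new l [] l.length le_rfl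

lemma subst_append (o : Char) (new l1 l2 : List Char) :
    pvSubst o new (l1 ++ l2) = pvSubst o new l1 ++ pvSubst o new l2 := by
  simp [pvSubst]

lemma applyAll_append (ps : List (Char × List Char)) :
    ∀ l1 l2, pvApplyAll ps (l1 ++ l2) = pvApplyAll ps l1 ++ pvApplyAll ps l2 := by
  induction ps with
  | nil => intro l1 l2; simp [pvApplyAll]
  | cons p ps ih =>
    intro l1 l2
    simp only [pvApplyAll, List.foldl_cons, subst_append]
    exact ih _ _

lemma applyAll_nil (ps : List (Char × List Char)) : pvApplyAll ps [] = [] := by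
  induction ps with
  | nil => rfl
  | cons p ps ih => simpa [pvApplyAll, pvSubst] using ih

lemma applyAll_flatMap (l : List Char) :
    pvApplyAll pvPassesC l = l.flatMap (fun c => pvApplyAll pvPassesC [c]) := by
  induction l with
  | nil => simp [applyAll_nil]
  | cons c t ih =>
    have := applyAll_append pvPassesC [c] t
    simp only [List.singleton_append] at this
    rw [this, ih, List.flatMap_cons]

lemma subst_singleton (o : Char) (new : List Char) (c : Char) :
    pvSubst o new [c] = if c = o then new else [c] := by
  simp [pvSubst]

lemma char_eq_of_toNat (c d : Char) (h : c.toNat = d.toNat) : c = d :=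
  Char.ext (UInt32.toNat_inj.mp h)

lemma digit_cases (c : Char) (h : c.isDigit = true) :
    c = '0' ∨ c = '1' ∨ c = '2' ∨ c = '3' ∨ c = '4' ∨ c = '5' ∨ c = '6' ∨
    c = '7' ∨ c = '8' ∨ c = '9' := by
  simp only [Char.isDigit, Bool.and_eq_true, decide_eq_true_eq] at h
  obtain ⟨h1, h2⟩ := h
  have hv1 := UInt32.le_iff_toNat_le.mp h1
  have hv2 := UInt32.le_iff_toNat_le.mp h2
  have hval : c.toNat = 48 ∨ c.toNat = 49 ∨ c.toNat = 50 ∨ c.toNat = 51 ∨ c.toNat = 52 ∨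
      c.toNat = 53 ∨ c.toNat = 54 ∨ c.toNat = 55 ∨ c.toNat = 56 ∨ c.toNat = 57 := by
    have e0 : ('0' : Char).val.toNat = 48 := by decide
    have e9 : ('9' : Char).val.toNat = 57 := by decide
    simp only [Char.toNat] at *; omega
  rcases hval with h | h | h | h | h | h | h | h | h | h <;>
    [ exact Or.inl (char_eq_of_toNat _ _ (h.trans (by decide)));
      exact Or.inr (Or.inl (char_eq_of_toNat _ _ (h.trans (by decide))));
      exact Or.inr (Or.inr (Or.inl (char_eq_of_toNat _ _ (h.trans (by decide)))));
      exact Or.inr (Or.inr (Or.inr (Or.inl (char_eq_of_toNat _ _ (h.trans (by decide))))));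
      exact Or.inr (Or.inr (Or.inr (Or.inr (Or.inl (char_eq_of_toNat _ _ (h.trans (by decide)))))));
      exact Or.inr (Or.inr (Or.inr (Or.inr (Or.inr (Or.inl (char_eq_of_toNat _ _ (h.trans (by decide))))))));
      exact Or.inr (Or.inr (Or.inr (Or.inr (Or.inr (Or.inr (Or.inl (char_eq_of_toNat _ _ (h.trans (by decide)))))))));
      exact Or.inr (Or.inr (Or.inr (Or.inr (Or.inr (Or.inr (Or.inr (Or.inl (char_eq_of_toNat _ _ (h.trans (by decide))))))))));
      exact Or.inr (Or.inr (Or.inr (Or.inr (Or.inr (Or.inr (Or.inr (Or.inr (Or.inl (char_eq_of_toNat _ _ (h.trans (by decide)))))))))));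
      exact Or.inr (Or.inr (Or.inr (Or.inr (Or.inr (Or.inr (Or.inr (Or.inr (Or.inr (char_eq_of_toNat _ _ (h.trans (by decide)))))))))))]

lemma point (c : Char) : pvApplyAll pvPassesC [c] = pvTranslate1 c := by
  by_cases hd : c.isDigit
  · rcases digit_cases c hd with h | h | h | h | h | h | h | h | h | h <;> subst h <;> decide
  · by_cases hm : c = '-'
    · subst hm; decide
    · by_cases hp : c = '+'
      · subst hp; decide
      · by_cases hh : c = '#'
        · subst hh; decide
        · have h09 : c ≠ '0' ∧ c ≠ '1' ∧ c ≠ '2' ∧ c ≠ '3' ∧ c ≠ '4' ∧ c ≠ '5' ∧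
              c ≠ '6' ∧ c ≠ '7' ∧ c ≠ '8' ∧ c ≠ '9' := by
            refine ⟨?_, ?_, ?_, ?_, ?_, ?_, ?_, ?_, ?_, ?_⟩ <;>
              (intro h; subst h; simp [Char.isDigit] at hd)
          obtain ⟨n0, n1, n2, n3, n4, n5, n6, n7, n8, n9⟩ := h09
          simp [pvApplyAll, pvPassesC, subst_singleton, pvTranslate1, hd, hm, hp, hh,
            n0, n1, n2, n3, n4, n5, n6, n7, n8, n9]

lemma step_eq_trans (newname : List Char) (c : Char) :
    spnToLatexStep newname c = newname ++ pvTranslate1 c := by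
  unfold spnToLatexStep pvTranslate1
  split_ifs <;> rfl

lemma fold_eq_flatMap (l : List Char) :
    l.foldl spnToLatexStep [] = l.flatMap pvTranslate1 := by
  have h := PySem.List.foldl_congr_mem (l := l) (init := ([] : List Char))
    (f := spnToLatexStep) (g := fun acc c => acc ++ pvTranslate1 c)
    (by intro acc x _; exact step_eq_trans acc x)
  rw [h, PySem.List.foldl_append_eq_flatMap]
  simp

lemma bfold (s : String) :
    pvPasses.foldl (fun s p => PySem.Str.replace s p.1 p.2) s
      = String.ofList (pvApplyAll pvPassesC s.toList) := by
  simp only [pvPasses, pvPassesC, pvApplyAll, List.foldl_cons, List.foldl_nil,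
    PySem.Str.replace, String.toList_ofList,
    show ("-" : String).toList = ['-'] from rfl, show ("^-" : String).toList = ['^','-'] from rfl,
    show ("+" : String).toList = ['+'] from rfl, show ("^+" : String).toList = ['^','+'] from rfl,
    show ("#" : String).toList = ['#'] from rfl, show ("\\#" : String).toList = ['\\','#'] from rfl,
    show ("0" : String).toList = ['0'] from rfl, show ("_0" : String).toList = ['_','0'] from rfl,
    show ("1" : String).toList = ['1'] from rfl, show ("_1" : String).toList = ['_','1'] from rfl,
    show ("2" : String).toList = ['2'] from rfl, show ("_2" : String).toList = ['_','2'] from rfl,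
    show ("3" : String).toList = ['3'] from rfl, show ("_3" : String).toList = ['_','3'] from rfl,
    show ("4" : String).toList = ['4'] from rfl, show ("_4" : String).toList = ['_','4'] from rfl,
    show ("5" : String).toList = ['5'] from rfl, show ("_5" : String).toList = ['_','5'] from rfl,
    show ("6" : String).toList = ['6'] from rfl, show ("_6" : String).toList = ['_','6'] from rfl,
    show ("7" : String).toList = ['7'] from rfl, show ("_7" : String).toList = ['_','7'] from rfl,
    show ("8" : String).toList = ['8'] from rfl, show ("_8" : String).toList = ['_','8'] from rfl,
    show ("9" : String).toList = ['9'] from rfl, show ("_9" : String).toList = ['_','9'] from rfl,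
    replace_single]

-- ===== VERDICT (by name: the statement is the Claim_ definition above) =====
set_option maxRecDepth 8192 in
theorem spnToLatex_spec : Claim_equal_spnToLatex := by
  intro spname _
  unfold Spec_spnToLatex spnToLatex spnToLatex_alt
  by_cases h0 : spname = "HN2+"
  · subst h0; decide
  · by_cases h1 : spname = "C18O"
    · subst h1; decide
    · by_cases h2 : spname = "13CO"
      · subst h2; decide
      · simp only [h0, h1, h2, if_false]
        rw [bfold, fold_eq_flatMap, applyAll_flatMap]
        simp [point]
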